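-- pv_equiv track=rewrite | github.com/LevivanBroekhoven/Leren_Programmeren | Toetsen/toets2803.py | omgedraaid_even
-- ===== SOURCE A (Python) =====
-- def omgedraaid_even(lijst: list) -> list:
--     hoelang = len(lijst)
--     for y in range(hoelang):
--         for x in lijst:
--             if x % 2 != 0:
--                 lijst.remove(x)
--             else:
--                 ("niks")
--     a = lijst[:: -1]
--     return a
-- ===== SOURCE B (Python) =====
-- def omgedraaid_even(lijst: list) -> list:
--     # single pass instead of A's nested remove-scans; same in-place mutation:
--     # lijst ends as the evens in original order, return value is their reversal
--     lijst[:] = [x for x in lijst if x % 2 == 0]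
--     return lijst[::-1]
-- ===== Notes on version B (the rewrite author's own statement) =====
-- stated objective: simpler
-- what changed: Replaces A's hoelang repeated mutating scans with list.remove (quadratic-plus) by one filtering comprehension slice-assigned back into lijst, then returns the reversed list.
import Mathlib
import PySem

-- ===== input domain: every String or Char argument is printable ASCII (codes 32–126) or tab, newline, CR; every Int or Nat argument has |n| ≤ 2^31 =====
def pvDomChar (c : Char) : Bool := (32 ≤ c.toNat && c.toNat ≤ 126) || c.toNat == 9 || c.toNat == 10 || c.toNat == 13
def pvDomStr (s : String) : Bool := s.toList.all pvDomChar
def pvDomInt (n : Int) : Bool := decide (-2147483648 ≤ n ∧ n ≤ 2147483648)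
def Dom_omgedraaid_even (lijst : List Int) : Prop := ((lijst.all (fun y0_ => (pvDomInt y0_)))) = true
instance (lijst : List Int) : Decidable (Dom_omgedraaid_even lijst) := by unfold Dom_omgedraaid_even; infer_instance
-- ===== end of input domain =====

-- B replaces A's repeated mutating remove-scans by one filter + reverse; both mutate
-- lijst to the evens in original order, and the equivalence proved is about the return value.

-- ===== PORT A =====
-- one inner 'for x in lijst' pass with in-place remove, modelled by Python's list-iterator
-- semantics: the iterator's index i advances by one each step over the current list
def pvPass (l : List Int) (i : Nat) : List Int :=
  if h : i < l.length then
    let x := l[i]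
    if PySem.Int.mod x 2 != 0 then pvPass (l.erase x) (i + 1) else pvPass l (i + 1)
  else l
termination_by l.length - i
decreasing_by
  · have hm : l[i] ∈ l := List.getElem_mem h
    have := List.length_erase_of_mem hm
    omega
  · omega

def omgedraaid_even (lijst : List Int) : List Int :=
  let hoelang : Int := lijst.length
  let l2 := (PySem.List.pyRange 0 hoelang 1).foldl (fun acc _ => pvPass acc 0) lijst
  (PySem.List.slice? l2 none none (-1)).getD []   -- lijst[::-1]

-- ===== PORT B =====
def omgedraaid_even_alt (lijst : List Int) : List Int :=
  (lijst.filter (fun x => PySem.Int.mod x 2 == 0)).reverse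

-- ===== PRECONDITION & SPEC =====
def Spec_omgedraaid_even (lijst : List Int) (out : List Int) : Prop := out = omgedraaid_even_alt lijst
instance (lijst : List Int) (out : List Int) : Decidable (Spec_omgedraaid_even lijst out) := by unfold Spec_omgedraaid_even; infer_instance

-- ===== CLAIM (what is proved, stated in full; the proofs are below) =====
def Claim_equal_omgedraaid_even : Prop := ∀ (lijst : List Int), Dom_omgedraaid_even lijst → Spec_omgedraaid_even lijst (omgedraaid_even lijst)

-- ===== LEMMAS AND PROOFS =====

def pvOdd (x : Int) : Bool := PySem.Int.mod x 2 != 0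

def pvCountOdd (l : List Int) : Nat := l.countP pvOdd

-- erasing an odd element does not change the even-filtered list
theorem pv_filter_erase (l : List Int) (x : Int) (hx : pvOdd x = true) :
    (l.erase x).filter (fun y => !pvOdd y) = l.filter (fun y => !pvOdd y) := by
  induction l with
  | nil => simp
  | cons a t ih =>
    by_cases hax : a = x
    · subst hax
      simp [List.erase_cons_head, hx]
    · rw [List.erase_cons_tail (by simpa using hax)]
      simp [List.filter_cons, ih]

-- erasing an odd member drops the odd count by exactly one
theorem pv_countOdd_erase (l : List Int) (x : Int) (hx : pvOdd x = true) (hm : x ∈ l) :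
    pvCountOdd (l.erase x) + 1 = pvCountOdd l := by
  induction l with
  | nil => cases hm
  | cons a t ih =>
    by_cases hax : a = x
    · subst hax
      simp [pvCountOdd, List.erase_cons_head, hx]
    · rw [List.erase_cons_tail (by simpa using hax)]
      have hmt : x ∈ t := by cases hm with
        | head => exact absurd rfl hax
        | tail _ h => exact h
      have h := ih hmt
      simp only [pvCountOdd, List.countP_cons] at h ⊢
      omega

-- a pass only removes odd elements: the even-filtered list is invariant
theorem pv_pass_filter (l : List Int) (i : Nat) :
    (pvPass l i).filter (fun y => !pvOdd y) = l.filter (fun y => !pvOdd y) := by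
  fun_induction pvPass l i with
  | case1 l i h x hodd ih =>
    rw [ih, pv_filter_erase l x (by simpa [pvOdd] using hodd)]
  | case2 l i h x hodd ih => exact ih
  | case3 l i h => rfl

-- a pass never adds odd elements
theorem pv_pass_countOdd_le (l : List Int) (i : Nat) :
    pvCountOdd (pvPass l i) ≤ pvCountOdd l := by
  fun_induction pvPass l i with
  | case1 l i h x hodd ih =>
    have hx : pvOdd x = true := by simpa [pvOdd] using hodd
    have := pv_countOdd_erase l x hx (List.getElem_mem h)
    omega
  | case2 l i h x hodd ih => exact ih
  | case3 l i h => exact le_rfl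

-- if an odd element sits at some position ≥ i, a pass strictly decreases the odd count
theorem pv_pass_countOdd_lt (l : List Int) (i : Nat)
    (hex : ∃ j, i ≤ j ∧ ∃ h : j < l.length, pvOdd l[j] = true) :
    pvCountOdd (pvPass l i) < pvCountOdd l := by
  fun_induction pvPass l i with
  | case1 l i h x hodd ih =>
    have hx : pvOdd x = true := by simpa [pvOdd] using hodd
    have h1 := pv_pass_countOdd_le (l.erase x) (i + 1)
    have h2 := pv_countOdd_erase l x hx (List.getElem_mem h)
    omega
  | case2 l i h x heven ih =>
    apply ih
    obtain ⟨j, hij, hj, hodd⟩ := hex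
    refine ⟨j, ?_, hj, hodd⟩
    rcases Nat.eq_or_lt_of_le hij with heq | hlt
    · exfalso
      subst heq
      simp only [pvOdd, bne_iff_ne, ne_eq] at hodd
      simp only [bne_iff_ne, ne_eq, Decidable.not_not] at heven
      exact hodd heven
    · omega
  | case3 l i h =>
    obtain ⟨j, hij, hj, _⟩ := hex
    exact absurd (Nat.lt_of_le_of_lt hij hj) h

-- iterating the pass n times: filter invariant, odd count ≤ original − n
theorem pv_iter (ys : List Int) (l : List Int) :
    (ys.foldl (fun acc _ => pvPass acc 0) l).filter (fun y => !pvOdd y)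
      = l.filter (fun y => !pvOdd y)
    ∧ pvCountOdd (ys.foldl (fun acc _ => pvPass acc 0) l) ≤ pvCountOdd l - ys.length := by
  induction ys generalizing l with
  | nil => simp
  | cons a t ih =>
    simp only [List.foldl_cons, List.length_cons]
    obtain ⟨ih1, ih2⟩ := ih (pvPass l 0)
    constructor
    · rw [ih1, pv_pass_filter]
    · by_cases h0 : pvCountOdd l = 0
      · have hle := pv_pass_countOdd_le l 0
        omega
      · have hlt : pvCountOdd (pvPass l 0) < pvCountOdd l := by
          apply pv_pass_countOdd_lt
          have hpos : 0 < l.countP pvOdd := Nat.pos_of_ne_zero h0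
          obtain ⟨x, hxm, hx⟩ := List.countP_pos_iff.mp hpos
          obtain ⟨j, hj, hje⟩ := List.mem_iff_getElem.mp hxm
          exact ⟨j, Nat.zero_le _, hj, by rw [hje]; exact hx⟩
        omega

theorem omgedraaid_even_spec : Claim_equal_omgedraaid_even := by
  intro lijst _
  unfold Spec_omgedraaid_even omgedraaid_even omgedraaid_even_alt
  simp only [PySem.List.slice?_none_none_neg_one, Option.getD_some]
  congr 1
  set r := (PySem.List.pyRange 0 (lijst.length : Int) 1).foldl (fun acc _ => pvPass acc 0) lijst with hr
  obtain ⟨h1, h2⟩ := pv_iter (PySem.List.pyRange 0 (lijst.length : Int) 1) lijst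
  rw [← hr] at h1 h2
  have hlen : (PySem.List.pyRange 0 (lijst.length : Int) 1).length = lijst.length := by
    simp [PySem.List.length_pyRange_one]
  have hcle : pvCountOdd lijst ≤ lijst.length := List.countP_le_length
  have h0 : pvCountOdd r = 0 := by omega
  have hr_eq : r.filter (fun y => !pvOdd y) = r := by
    apply List.filter_eq_self.mpr
    intro x hx
    cases hpx : pvOdd x with
    | false => simp
    | true =>
      exfalso
      have := List.countP_pos_iff.mpr ⟨x, hx, hpx⟩
      simp only [pvCountOdd] at h0
      omega
  rw [← hr_eq, h1]
  apply List.filter_congr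
  intro x _
  simp only [pvOdd, bne, Bool.not_not]
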